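-- pv_equiv track=rewrite | github.com/andrealexopoulos-star/Version2-Ai_Mentor | backend/core/response_sanitizer.py | _roll_up_top_state
-- ===== SOURCE A (Python) =====
-- from enum import Enum
-- from typing import Any, Dict, Iterable, List, Mapping, Optional, Tuple
--
-- class ExternalState(str, Enum):
--     """The only values allowed to appear on a frontend-facing response."""
--     DATA_AVAILABLE = "DATA_AVAILABLE"
--     DATA_UNAVAILABLE = "DATA_UNAVAILABLE"
--     INSUFFICIENT_SIGNAL = "INSUFFICIENT_SIGNAL"
--     PROCESSING = "PROCESSING"
--     DEGRADED = "DEGRADED"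
--
-- def _roll_up_top_state(section_states: Mapping[str, ExternalState]) -> ExternalState:
--     """Combine per-section states into a single top-level state.
--
--     Rules:
--         - If any section is PROCESSING → top = PROCESSING
--         - If all sections are DATA_AVAILABLE → top = DATA_AVAILABLE
--         - If all sections are DATA_UNAVAILABLE → top = DATA_UNAVAILABLE
--         - Otherwise → top = DEGRADED
--     """
--     if not section_states:
--         return ExternalState.DEGRADED
--     values = list(section_states.values())
--     if any(v == ExternalState.PROCESSING for v in values):
--         return ExternalState.PROCESSING
--     if all(v == ExternalState.DATA_AVAILABLE for v in values):
--         return ExternalState.DATA_AVAILABLE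
--     if all(v == ExternalState.DATA_UNAVAILABLE for v in values):
--         return ExternalState.DATA_UNAVAILABLE
--     return ExternalState.DEGRADED
-- ===== SOURCE B (Python) =====
-- from enum import Enum
--
-- class ExternalState(str, Enum):
--     DATA_AVAILABLE = "DATA_AVAILABLE"
--     DATA_UNAVAILABLE = "DATA_UNAVAILABLE"
--     INSUFFICIENT_SIGNAL = "INSUFFICIENT_SIGNAL"
--     PROCESSING = "PROCESSING"
--     DEGRADED = "DEGRADED"
--
-- def _roll_up_top_state(section_states):
--     # Single pass: pairwise-merge the states left to right, then clamp the
--     # result to one of the three representable roll-ups (else DEGRADED).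
--     top = None
--     for v in section_states.values():
--         if top is None:
--             top = v
--         elif v == ExternalState.PROCESSING or top == ExternalState.PROCESSING:
--             top = ExternalState.PROCESSING
--         elif v != top:
--             top = ExternalState.DEGRADED
--     if top in (ExternalState.PROCESSING,
--                ExternalState.DATA_AVAILABLE,
--                ExternalState.DATA_UNAVAILABLE):
--         return top
--     return ExternalState.DEGRADED
-- ===== Notes on version B (the rewrite author's own statement) =====
-- stated objective: alternative
-- what changed: B makes a single pass that pairwise-merges the states with a reduce-style combine (PROCESSING absorbs, unequal pair degrades) and clamps the final accumulator, instead of A's staged any-scan plus two all-scans over the values.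
import Mathlib
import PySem

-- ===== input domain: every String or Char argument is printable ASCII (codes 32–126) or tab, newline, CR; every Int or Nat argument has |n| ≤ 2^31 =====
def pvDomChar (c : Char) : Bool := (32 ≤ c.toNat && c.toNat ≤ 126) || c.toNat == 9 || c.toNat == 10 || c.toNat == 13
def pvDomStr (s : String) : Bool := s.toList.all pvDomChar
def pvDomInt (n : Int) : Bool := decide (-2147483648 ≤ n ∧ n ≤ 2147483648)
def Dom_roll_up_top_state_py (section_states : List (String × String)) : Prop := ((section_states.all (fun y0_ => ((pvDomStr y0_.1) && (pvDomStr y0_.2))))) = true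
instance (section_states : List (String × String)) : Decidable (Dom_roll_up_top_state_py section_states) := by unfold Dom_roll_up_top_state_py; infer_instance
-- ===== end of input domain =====

-- B replaces A's staged any/all scans with a single left-to-right pairwise-merge fold
-- followed by a final clamp (alternative decomposition; same cost).

-- ===== PORT A =====
def roll_up_top_state_py (section_states : List (String × String)) : String :=
  if section_states = [] then "DEGRADED"
  else
    let values := section_states.map Prod.snd
    if values.any (fun v => v == "PROCESSING") then "PROCESSING"
    else if values.all (fun v => v == "DATA_AVAILABLE") then "DATA_AVAILABLE"
    else if values.all (fun v => v == "DATA_UNAVAILABLE") then "DATA_UNAVAILABLE"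
    else "DEGRADED"

-- ===== PORT B =====
-- merge step of B's loop body (top is None ↦ none)
def pvMergeStep (top : Option String) (v : String) : Option String :=
  match top with
  | none => some v
  | some t =>
    if v == "PROCESSING" || t == "PROCESSING" then some "PROCESSING"
    else if v != t then some "DEGRADED"
    else some t

def roll_up_top_state_py_alt (section_states : List (String × String)) : String :=
  let top := (section_states.map Prod.snd).foldl pvMergeStep none
  match top with
  | some t =>
    if t == "PROCESSING" || t == "DATA_AVAILABLE" || t == "DATA_UNAVAILABLE" then t
    else "DEGRADED"
  | none => "DEGRADED"

-- ===== PRECONDITION & SPEC =====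
def Spec_roll_up_top_state_py (section_states : List (String × String)) (out : String) : Prop := out = roll_up_top_state_py_alt section_states
instance (section_states : List (String × String)) (out : String) : Decidable (Spec_roll_up_top_state_py section_states out) := by unfold Spec_roll_up_top_state_py; infer_instance

-- ===== CLAIM (what is proved, stated in full; the proofs are below) =====
def Claim_equal_roll_up_top_state_py : Prop := ∀ (section_states : List (String × String)), Dom_roll_up_top_state_py section_states → Spec_roll_up_top_state_py section_states (roll_up_top_state_py section_states)

-- ===== LEMMAS AND PROOFS =====

-- characterisation of B's fold started at `some t`
theorem pv_fold_merge (l : List String) (t : String) :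
    l.foldl pvMergeStep (some t) =
      some (if t == "PROCESSING" || l.any (fun v => v == "PROCESSING") then "PROCESSING"
            else if l.all (fun v => v == t) then t else "DEGRADED") := by
  induction l generalizing t with
  | nil => simp
  | cons v rest ih =>
    by_cases hv : v = "PROCESSING"
    · subst hv; simp [pvMergeStep, ih]
    · by_cases ht : t = "PROCESSING"
      · subst ht; simp [pvMergeStep, ih]
      · by_cases hvt : v = t
        · subst hvt; simp [pvMergeStep, hv, ih]
        · simp only [List.foldl_cons, pvMergeStep]
          rw [if_neg (by simp [hv, ht]), if_pos (by simp [hvt]), ih]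
          simp [hv, ht, hvt]

-- ===== VERDICT (by name: the statement is the Claim_ definition above) =====
theorem roll_up_top_state_py_spec : Claim_equal_roll_up_top_state_py := by
  intro ss _
  unfold Spec_roll_up_top_state_py roll_up_top_state_py roll_up_top_state_py_alt
  match ss with
  | [] => simp
  | (k, v0) :: rest =>
    simp only [List.map_cons, List.foldl_cons, pvMergeStep, pv_fold_merge,
      List.any_cons, List.all_cons, reduceCtorEq, if_false]
    by_cases h0 : v0 = "PROCESSING"
    · subst h0; simp
    · by_cases hp : (rest.map Prod.snd).any (fun v => v == "PROCESSING")
      · simp [hp]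
      · by_cases hda : v0 = "DATA_AVAILABLE"
        · subst hda
          by_cases hall : (rest.map Prod.snd).all (fun v => v == "DATA_AVAILABLE") <;> simp [hp, hall]
        · by_cases hdu : v0 = "DATA_UNAVAILABLE"
          · subst hdu
            by_cases hall : (rest.map Prod.snd).all (fun v => v == "DATA_UNAVAILABLE") <;> simp [hp, hall]
          · by_cases hall : (rest.map Prod.snd).all (fun v => v == v0) <;>
              simp [hp, hall, h0, hda, hdu]
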